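-- pv_equiv track=rewrite | github.com/Nogal2222/CoTe | 프로그래머스/level 1/폰켓몬.py | solution
-- ===== SOURCE A (Python) =====
-- def solution(nums):
--     answer = 0
--     length = len(nums) // 2
--     temp = list(set(nums))
--
--     for routine in range(len(temp)):
--         if answer < length:
--             answer += 1
--
--     return answer
-- ===== SOURCE B (Python) =====
-- def solution(nums):
--     return min(len(set(nums)), len(nums) // 2)
-- ===== Notes on version B (the rewrite author's own statement) =====
-- stated objective: simpler
-- what changed: Replaced A's counting loop over the deduplicated list (incrementing an accumulator up to the cap) with the closed-form min(len(set(nums)), len(nums)//2).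
import Mathlib
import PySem

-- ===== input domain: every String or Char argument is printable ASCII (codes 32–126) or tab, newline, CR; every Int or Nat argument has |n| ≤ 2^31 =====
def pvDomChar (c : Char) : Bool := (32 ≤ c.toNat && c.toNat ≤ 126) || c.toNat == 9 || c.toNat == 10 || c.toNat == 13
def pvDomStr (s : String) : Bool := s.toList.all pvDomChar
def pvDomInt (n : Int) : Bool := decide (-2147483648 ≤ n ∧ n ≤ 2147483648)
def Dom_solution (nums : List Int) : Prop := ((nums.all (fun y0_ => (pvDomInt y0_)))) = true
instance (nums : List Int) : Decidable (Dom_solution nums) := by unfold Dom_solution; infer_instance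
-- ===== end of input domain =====

-- B replaces A's counting loop with the closed form min(len(set(nums)), len(nums)//2); objective: simpler.
-- ===== PORT A =====
def solution (nums : List Int) : Int :=
  -- answer = 0; length = len(nums) // 2; temp = list(set(nums))
  let length : Int := PySem.Int.floordiv (nums.length : Int) 2
  let temp : List Int := PySem.Set.ofList nums
  -- for routine in range(len(temp)): if answer < length: answer += 1
  (PySem.List.pyRange 0 (temp.length : Int) 1).foldl
    (fun answer _ => if answer < length then answer + 1 else answer) 0

-- ===== PORT B =====
def solution_alt (nums : List Int) : Int :=
  min ((PySem.Set.ofList nums).length : Int) (PySem.Int.floordiv (nums.length : Int) 2)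

-- ===== PRECONDITION & SPEC =====
def Spec_solution (nums : List Int) (out : Int) : Prop := out = solution_alt nums
instance (nums : List Int) (out : Int) : Decidable (Spec_solution nums out) := by unfold Spec_solution; infer_instance

-- ===== CLAIM (what is proved, stated in full; the proofs are below) =====
def Claim_equal_solution : Prop := ∀ (nums : List Int), Dom_solution nums → Spec_solution nums (solution nums)

-- ===== LEMMAS AND PROOFS =====
-- A's loop, started at ans, ends at max ans (min (ans + #iterations) L).
theorem foldl_count_cap (xs : List Int) (L ans : Int) :
    xs.foldl (fun a _ => if a < L then a + 1 else a) ans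
      = max ans (min (ans + xs.length) L) := by
  induction xs generalizing ans with
  | nil => simp only [List.foldl_nil, List.length_nil]; omega
  | cons x xs ih =>
    simp only [List.foldl_cons, List.length_cons, ih]
    split_ifs with h <;> push_cast <;> omega

-- ===== VERDICT (by name: the statement is the Claim_ definition above) =====
theorem solution_spec : Claim_equal_solution := by
  intro nums _
  unfold Spec_solution solution solution_alt
  rw [foldl_count_cap]
  simp [PySem.List.length_pyRange_one]
  omega
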